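-- pv_equiv track=rewrite | github.com/jhouse01/Assignment4 | timed_challenge.py | insert_after_value
-- ===== SOURCE A (Python) =====
-- def insert_after_value(lst, target, new_value):
--     """
--     Inserts new_value immediately after the first occurrence of target.
--     Returns a new list. Raises TypeError with a specific message if:
--     - input is not a list, or
--     - target is not found in the list.
--     """
--     if not isinstance(lst, list):
--         raise TypeError("Input must be a list.")
--
--     result = []
--     inserted = False
--
--     for item in lst:
--         result.append(item)
--         if item == target and not inserted:
--             result.append(new_value)
--             inserted = True
--
--     if not inserted:
--         # target not found — include actual list in the message
--         raise TypeError(f"{lst} (target not found)")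
--
--     return result
-- ===== SOURCE B (Python) =====
-- def insert_after_value(lst, target, new_value):
--     if not isinstance(lst, list):
--         raise TypeError("Input must be a list.")
--     try:
--         i = lst.index(target)
--     except ValueError:
--         raise TypeError(f"{lst} (target not found)")
--     return lst[:i + 1] + [new_value] + lst[i + 1:]
-- ===== Notes on version B (the rewrite author's own statement) =====
-- stated objective: idiomatic
-- what changed: Replaces the append loop with an 'inserted' flag by lst.index plus slice concatenation around the first occurrence.
import Mathlib
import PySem

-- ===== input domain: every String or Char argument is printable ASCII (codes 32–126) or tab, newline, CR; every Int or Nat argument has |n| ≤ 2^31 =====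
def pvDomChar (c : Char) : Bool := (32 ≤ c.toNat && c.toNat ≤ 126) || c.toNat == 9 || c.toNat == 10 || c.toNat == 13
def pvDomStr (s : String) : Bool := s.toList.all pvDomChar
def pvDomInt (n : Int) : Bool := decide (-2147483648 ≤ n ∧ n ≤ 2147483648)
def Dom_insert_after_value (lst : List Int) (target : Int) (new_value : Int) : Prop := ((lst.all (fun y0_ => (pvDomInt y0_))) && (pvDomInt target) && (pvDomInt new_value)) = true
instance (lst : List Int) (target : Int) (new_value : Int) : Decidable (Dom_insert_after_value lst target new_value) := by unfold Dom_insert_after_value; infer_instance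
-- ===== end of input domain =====

-- B replaces A's append loop with an 'inserted' flag by index + slice concatenation (idiomatic).


-- ===== PORT A =====
-- loop body: result.append(item); if item == target and not inserted: result.append(new_value); inserted = True
def iavStep (target new_value : Int) (acc : List Int × Bool) (item : Int) : List Int × Bool :=
  let r := acc.1 ++ [item]
  if item == target && !acc.2 then (r ++ [new_value], true) else (r, acc.2)

def insert_after_value (lst : List Int) (target : Int) (new_value : Int) : List Int :=
  let st := lst.foldl (iavStep target new_value) ([], false)
  -- if not st.2 Python raises TypeError (excluded by Pre_); the return value is st.1
  st.1

-- ===== PORT B =====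
def insert_after_value_alt (lst : List Int) (target : Int) (new_value : Int) : List Int :=
  match PySem.List.index? lst target with
  | some i =>
      PySem.List.slice lst (some 0) (some ((i : Int) + 1)) ++ [new_value]
        ++ PySem.List.slice lst (some ((i : Int) + 1)) none
  | none => []  -- Python B raises TypeError here (excluded by Pre_)

-- ===== PRECONDITION & SPEC =====
-- Pre_ excludes exactly the inputs where A (and B) raise TypeError: target not in the list.
def Pre_insert_after_value (lst : List Int) (target : Int) (new_value : Int) : Prop :=
  target ∈ lst
instance (lst : List Int) (target : Int) (new_value : Int) : Decidable (Pre_insert_after_value lst target new_value) := by unfold Pre_insert_after_value; infer_instance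
def pvWitness_insert_after_value : List Int × Int × Int := ([1, 2, 3], 2, 9)

def Spec_insert_after_value (lst : List Int) (target : Int) (new_value : Int) (out : List Int) : Prop := out = insert_after_value_alt lst target new_value
instance (lst : List Int) (target : Int) (new_value : Int) (out : List Int) : Decidable (Spec_insert_after_value lst target new_value out) := by unfold Spec_insert_after_value; infer_instance

-- ===== CLAIM (what is proved, stated in full; the proofs are below) =====
def Claim_equal_insert_after_value : Prop := ∀ (lst : List Int) (target : Int) (new_value : Int), Dom_insert_after_value lst target new_value → Pre_insert_after_value lst target new_value → Spec_insert_after_value lst target new_value (insert_after_value lst target new_value)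

-- ===== LEMMAS AND PROOFS =====

theorem iavStep_true (target new_value x : Int) (acc : List Int) :
    iavStep target new_value (acc, true) x = (acc ++ [x], true) := by
  simp [iavStep]

theorem iavStep_false_eq (target new_value : Int) (acc : List Int) :
    iavStep target new_value (acc, false) target = (acc ++ [target] ++ [new_value], true) := by
  simp [iavStep]

theorem iavStep_false_ne (target new_value x : Int) (acc : List Int) (h : x ≠ target) :
    iavStep target new_value (acc, false) x = (acc ++ [x], false) := by
  simp [iavStep, h]

-- once inserted, the loop just appends the remaining items
theorem loop_inserted (lst : List Int) (target new_value : Int) (acc : List Int) :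
    lst.foldl (iavStep target new_value) (acc, true) = (acc ++ lst, true) := by
  induction lst generalizing acc with
  | nil => simp
  | cons x xs ih => rw [List.foldl_cons, iavStep_true, ih]; simp

-- before insertion, the loop result is characterised by index?
theorem loop_not_inserted (lst : List Int) (target new_value : Int) (acc : List Int)
    (h : target ∈ lst) :
    ∃ i, PySem.List.index? lst target = some i ∧
      lst.foldl (iavStep target new_value) (acc, false)
      = (acc ++ lst.take (i + 1) ++ [new_value] ++ lst.drop (i + 1), true) := by
  induction lst generalizing acc with
  | nil => cases h
  | cons x xs ih =>
    by_cases hx : x = target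
    · subst hx
      refine ⟨0, PySem.List.index?_cons_self .., ?_⟩
      rw [List.foldl_cons, iavStep_false_eq, loop_inserted]
      simp
    · have hmem : target ∈ xs := by
        rcases List.mem_cons.mp h with h1 | h1
        · exact absurd h1.symm hx
        · exact h1
      obtain ⟨i, hi, hfold⟩ := ih (acc ++ [x]) hmem
      refine ⟨i + 1, ?_, ?_⟩
      · rw [PySem.List.index?_cons_of_ne xs hx, hi]; rfl
      · rw [List.foldl_cons, iavStep_false_ne target new_value x acc hx, hfold]
        simp

-- ===== VERDICT (by name: the statement is the Claim_ definition above) =====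
theorem insert_after_value_spec : Claim_equal_insert_after_value := by
  intro lst target new_value _ hpre
  obtain ⟨i, hi, hfold⟩ := loop_not_inserted lst target new_value [] hpre
  simp only [Spec_insert_after_value, insert_after_value, insert_after_value_alt, hi, hfold]
  have h1 : ((i : Int) + 1) = ((i + 1 : Nat) : Int) := by push_cast; ring
  rw [h1, PySem.List.slice_zero_start, PySem.List.slice_to_natCast,
    PySem.List.slice_from_natCast]
  simp
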